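-- pv_equiv track=rewrite | github.com/Sunwoo0110/Algorithm | 프로그래머스/3/12987. 숫자 게임/숫자 게임.py | solution
-- ===== SOURCE A (Python) =====
-- def solution(A, B):
--     answer = 0
--
--     A.sort()
--     B.sort()
--
--     b_idx = 0
--
--     ## 그리디
--     for a in A:
--         while b_idx < len(B) and B[b_idx] <= a:
--             b_idx += 1
--
--         if b_idx < len(B):
--             answer += 1
--             b_idx += 1
--
--
--     return answer
-- ===== SOURCE B (Python) =====
-- def solution(A, B):
--     # Reverse greedy: match from the largest elements downward; a largest
--     # remaining A that even the largest remaining B cannot beat is discarded.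
--     # Keeps A.sort()/B.sort() in place to preserve A's argument mutation.
--     A.sort()
--     B.sort()
--     rb = B[::-1]
--     count = 0
--     j = 0
--     for a in reversed(A):
--         if j < len(rb) and rb[j] > a:
--             count += 1
--             j += 1
--     return count
-- ===== Notes on version B (the rewrite author's own statement) =====
-- stated objective: alternative
-- what changed: B computes the same maximum strict-beating matching by a largest-to-largest reverse greedy with a discard rule (single pointer over B reversed), instead of A's forward scan over ascending A with an inner while-loop skipping unusable B elements.
import Mathlib
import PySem

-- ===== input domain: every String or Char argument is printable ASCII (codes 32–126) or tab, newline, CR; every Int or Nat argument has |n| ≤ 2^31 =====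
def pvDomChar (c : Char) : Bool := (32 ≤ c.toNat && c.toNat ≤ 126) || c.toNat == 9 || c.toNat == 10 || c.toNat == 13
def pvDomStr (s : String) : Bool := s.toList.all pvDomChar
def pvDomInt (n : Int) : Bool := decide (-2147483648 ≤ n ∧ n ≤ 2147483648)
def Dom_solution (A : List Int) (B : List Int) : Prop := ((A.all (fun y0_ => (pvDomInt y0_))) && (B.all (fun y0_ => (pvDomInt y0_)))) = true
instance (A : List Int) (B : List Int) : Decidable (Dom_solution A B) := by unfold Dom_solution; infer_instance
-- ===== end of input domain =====

-- B replaces A's forward greedy (ascending scan with an inner skip loop) by a reverse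
-- greedy matching the largest elements first (objective: alternative, same cost).
-- Both Pythons sort A and B in place; the equivalence proved is about the return value
-- (B performs the same mutation).

-- ===== PORT A =====
-- the inner 'while b_idx < len(B) and B[b_idx] <= a: b_idx += 1' loop
def advA (B : List Int) (a : Int) (b_idx : Nat) : Nat :=
  if h : b_idx < B.length then
    if B[b_idx] ≤ a then advA B a (b_idx + 1) else b_idx
  else b_idx
termination_by B.length - b_idx

def solution (A : List Int) (B : List Int) : Int :=
  let A' := PySem.List.sorted A (fun x => x) false
  let B' := PySem.List.sorted B (fun x => x) false
  -- state (b_idx, answer), both start at 0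
  (A'.foldl (fun (st : Nat × Int) a =>
      let b := advA B' a st.1
      if b < B'.length then (b + 1, st.2 + 1) else (b, st.2)) (0, 0)).2

-- ===== PORT B =====
def solution_alt (A : List Int) (B : List Int) : Int :=
  let A' := PySem.List.sorted A (fun x => x) false
  let B' := PySem.List.sorted B (fun x => x) false
  let rb := (PySem.List.slice? B' none none (-1)).getD []   -- B[::-1]; step -1 always returns some
  -- state (count, j), both start at 0; loop 'for a in reversed(A')'
  (A'.reverse.foldl (fun (st : Int × Int) a =>
      if st.2 < (rb.length : Int) then
        match PySem.List.pyGet? rb st.2 with   -- rb[j]; some since 0 ≤ j < len(rb)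
        | some b => if a < b then (st.1 + 1, st.2 + 1) else st
        | none => st
      else st) (0, 0)).1

-- ===== PRECONDITION & SPEC =====
def Spec_solution (A : List Int) (B : List Int) (out : Int) : Prop := out = solution_alt A B
instance (A : List Int) (B : List Int) (out : Int) : Decidable (Spec_solution A B out) := by unfold Spec_solution; infer_instance

-- ===== CLAIM (what is proved, stated in full; the proofs are below) =====
def Claim_equal_solution : Prop := ∀ (A : List Int) (B : List Int), Dom_solution A B → Spec_solution A B (solution A B)

-- ===== LEMMAS AND PROOFS =====

-- forward greedy on ascending lists (A's algorithm, list form)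
def opt : List Int → List Int → Int
  | [], _ => 0
  | _ :: _, [] => 0
  | a :: as, b :: bs => if a < b then 1 + opt as bs else opt (a :: as) bs
termination_by as bs => as.length + bs.length

-- reverse greedy on descending lists (B's algorithm, list form)
def grec : List Int → List Int → Int
  | [], _ => 0
  | _ :: _, [] => 0
  | a :: ra, b :: rb => if a < b then 1 + grec ra rb else grec ra (b :: rb)

-- reverse greedy, phrased on the ascending lists
def Gg (as bs : List Int) : Int := grec as.reverse bs.reverse

theorem opt_nil_right (as : List Int) : opt as [] = 0 := by cases as <;> simp [opt]

theorem grec_nil_right (ra : List Int) : grec ra [] = 0 := by cases ra <;> simp [grec]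

theorem grec_cons (a b : Int) (ra rb : List Int) :
    grec (a :: ra) (b :: rb) = if a < b then 1 + grec ra rb else grec ra (b :: rb) := rfl

theorem opt_cons (a : Int) (as bs : List Int) :
    opt (a :: as) bs =
      match bs.dropWhile (fun b => decide (b ≤ a)) with
      | [] => 0
      | _ :: bs' => 1 + opt as bs' := by
  induction bs with
  | nil => simp [opt_nil_right]
  | cons b bs ih =>
      by_cases h : b ≤ a
      · have hna : ¬ a < b := not_lt.mpr h
        simp [opt, hna, h, ih]
      · have ha : a < b := lt_of_not_ge h
        simp [opt, ha, h]

theorem advA_le (B : List Int) (a : Int) (k : Nat) (hk : k ≤ B.length) :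
    advA B a k ≤ B.length := by
  fun_induction advA B a k with
  | case1 k h hle ih => exact ih (by omega)
  | case2 k h hle => omega
  | case3 k h => omega

theorem advA_drop (B : List Int) (a : Int) (k : Nat) :
    B.drop (advA B a k) = (B.drop k).dropWhile (fun b => decide (b ≤ a)) := by
  fun_induction advA B a k with
  | case1 k h hle ih =>
      rw [ih, List.drop_eq_getElem_cons h, List.dropWhile_cons]
      simp [hle]
  | case2 k h hle =>
      rw [List.drop_eq_getElem_cons h, List.dropWhile_cons]
      simp [hle]
  | case3 k h =>
      have : B.drop k = [] := List.drop_eq_nil_of_le (by omega)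
      simp [this]

theorem foldA (B' : List Int) (as : List Int) (k : Nat) (c : Int) (hk : k ≤ B'.length) :
    (as.foldl (fun (st : Nat × Int) a =>
        let b := advA B' a st.1
        if b < B'.length then (b + 1, st.2 + 1) else (b, st.2)) (k, c)).2
      = c + opt as (B'.drop k) := by
  induction as generalizing k c with
  | nil => simp [opt]
  | cons a as ih =>
      simp only [List.foldl_cons]
      have hdrop := advA_drop B' a k
      by_cases hb : advA B' a k < B'.length
      · rw [List.drop_eq_getElem_cons hb] at hdrop
        simp only [hb, if_pos]
        rw [ih _ _ (by omega), opt_cons, ← hdrop]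
        show c + 1 + opt as (B'.drop (advA B' a k + 1)) =
             c + (1 + opt as (B'.drop (advA B' a k + 1)))
        ring
      · have hb' : advA B' a k = B'.length :=
          le_antisymm (advA_le B' a k hk) (le_of_not_gt hb)
        have hdnil : B'.drop (advA B' a k) = [] := by rw [hb']; simp
        simp only [hb, if_neg, not_false_iff]
        rw [ih _ _ (le_of_eq hb'), opt_cons, ← hdrop, hdnil]
        simp [opt_nil_right]

theorem foldB (rb : List Int) (ra : List Int) (c : Int) (n : Nat) :
    (ra.foldl (fun (st : Int × Int) a =>
        if st.2 < (rb.length : Int) then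
          match PySem.List.pyGet? rb st.2 with
          | some b => if a < b then (st.1 + 1, st.2 + 1) else st
          | none => st
        else st) (c, (n : Int))).1
      = c + grec ra (rb.drop n) := by
  induction ra generalizing c n with
  | nil => simp [grec]
  | cons a ra ih =>
      simp only [List.foldl_cons]
      by_cases hn : n < rb.length
      · have hlt : ((n : Int) < (rb.length : Int)) := by exact_mod_cast hn
        have hget : PySem.List.pyGet? rb (n : Int) = some rb[n] := by
          rw [PySem.List.pyGet?_natCast]; simp [hn]
        have hdrop : rb.drop n = rb[n] :: rb.drop (n + 1) := List.drop_eq_getElem_cons hn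
        rw [hdrop, grec_cons]
        simp only [hlt, if_true, hget]
        by_cases hab : a < rb[n]
        · simp only [hab, if_true]
          have hcast : ((n : Int) + 1) = ((n + 1 : Nat) : Int) := by omega
          rw [hcast, ih]
          ring
        · simp only [hab, if_false]
          rw [ih, ← hdrop]
      · have hge : ¬ ((n : Int) < (rb.length : Int)) := by omega
        have hdnil : rb.drop n = [] := List.drop_eq_nil_of_le (by omega)
        simp only [hge, if_false]
        rw [ih, hdnil, grec_nil_right, grec_nil_right]

theorem Gg_nil_left (bs : List Int) : Gg [] bs = 0 := by simp [Gg, grec]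

theorem Gg_nil_right (as : List Int) : Gg as [] = 0 := by simp [Gg, grec_nil_right]

theorem Gg_concat (as bs : List Int) (x y : Int) :
    Gg (as ++ [x]) (bs ++ [y]) = if x < y then 1 + Gg as bs else Gg as (bs ++ [y]) := by
  simp only [Gg, List.reverse_append, List.reverse_singleton, List.singleton_append, grec]

-- key lemma: the reverse greedy wins one extra pair when the smallest B beats the smallest A
theorem Gg_key (n : Nat) (as bs : List Int) (a0 b0 : Int)
    (hn : as.length + bs.length ≤ n)
    (hsa : (a0 :: as).Pairwise (· ≤ ·)) (hsb : (b0 :: bs).Pairwise (· ≤ ·))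
    (hab : a0 < b0) :
    Gg (a0 :: as) (b0 :: bs) = 1 + Gg as bs := by
  induction n generalizing as bs with
  | zero =>
      have ha : as = [] := by cases as <;> simp_all
      have hb : bs = [] := by cases bs <;> simp_all
      subst ha; subst hb
      simp [Gg, grec, hab]
  | succ n ih =>
      rcases List.eq_nil_or_concat as with ha | ⟨as', x, hx⟩
      · subst ha
        rcases List.eq_nil_or_concat bs with hb | ⟨bs', y, hy⟩
        · subst hb; simp [Gg, grec, hab]
        · rw [List.concat_eq_append] at hy; subst hy
          have hb0y : b0 ≤ y := (List.pairwise_cons.mp hsb).1 y (by simp)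
          have hay : a0 < y := lt_of_lt_of_le hab hb0y
          calc Gg ([] ++ [a0]) ((b0 :: bs') ++ [y])
              = if a0 < y then 1 + Gg [] (b0 :: bs') else Gg [] ((b0 :: bs') ++ [y]) :=
                Gg_concat _ _ _ _
            _ = 1 + Gg [] (bs' ++ [y]) := by simp [hay, Gg_nil_left]
      · rw [List.concat_eq_append] at hx; subst hx
        rcases List.eq_nil_or_concat bs with hb | ⟨bs', y, hy⟩
        · subst hb
          have hsa' : (a0 :: as').Pairwise (· ≤ ·) := by
            refine List.Pairwise.sublist ?_ hsa
            exact List.cons_sublist_cons.mpr (by simp)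
          have h1 : a0 :: (as' ++ [x]) = (a0 :: as') ++ [x] := rfl
          have h2 : [b0] = ([] : List Int) ++ [b0] := rfl
          rw [h1, h2, Gg_concat]
          by_cases hxb : x < b0
          · simp [hxb, Gg_nil_right]
          · have := ih as' [] (by simp at hn ⊢; omega) hsa' (by simp)
            simp only [hxb, if_false, List.nil_append]
            rw [this]
            simp [Gg_nil_right]
        · rw [List.concat_eq_append] at hy; subst hy
          have hsa' : (a0 :: as').Pairwise (· ≤ ·) := by
            refine List.Pairwise.sublist ?_ hsa
            exact List.cons_sublist_cons.mpr (by simp)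
          have hsb' : (b0 :: bs').Pairwise (· ≤ ·) := by
            refine List.Pairwise.sublist ?_ hsb
            exact List.cons_sublist_cons.mpr (by simp)
          have h1 : a0 :: (as' ++ [x]) = (a0 :: as') ++ [x] := rfl
          have h2 : b0 :: (bs' ++ [y]) = (b0 :: bs') ++ [y] := rfl
          rw [h1, h2, Gg_concat, Gg_concat]
          by_cases hxy : x < y
          · have := ih as' bs' (by simp at hn ⊢; omega) hsa' hsb'
            simp only [hxy, if_true]
            rw [this]
          · have := ih as' (bs' ++ [y]) (by simp at hn ⊢; omega) hsa' hsb
            simp only [hxy, if_false]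
            rw [← h2, this]

-- a B element that beats no element of as is invisible to the reverse greedy
theorem Gg_dropmin (n : Nat) (as bs : List Int) (b0 : Int)
    (hn : as.length + bs.length ≤ n)
    (hmin : ∀ x ∈ as, b0 ≤ x) :
    Gg as (b0 :: bs) = Gg as bs := by
  induction n generalizing as bs with
  | zero =>
      have ha : as = [] := by cases as <;> simp_all
      subst ha; simp [Gg_nil_left]
  | succ n ih =>
      rcases List.eq_nil_or_concat as with ha | ⟨as', x, hx⟩
      · subst ha; simp [Gg_nil_left]
      · rw [List.concat_eq_append] at hx; subst hx
        have hb0x : b0 ≤ x := hmin x (by simp)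
        have hmin' : ∀ z ∈ as', b0 ≤ z := fun z hz => hmin z (by simp [hz])
        rcases List.eq_nil_or_concat bs with hb | ⟨bs', y, hy⟩
        · subst hb
          have h2 : [b0] = ([] : List Int) ++ [b0] := rfl
          rw [h2, Gg_concat]
          have hxb : ¬ x < b0 := not_lt.mpr hb0x
          simp only [hxb, if_false, List.nil_append]
          rw [ih as' [] (by simp at hn ⊢; omega) hmin']
          simp [Gg_nil_right]
        · rw [List.concat_eq_append] at hy; subst hy
          have h2 : b0 :: (bs' ++ [y]) = (b0 :: bs') ++ [y] := rfl
          rw [h2, Gg_concat, Gg_concat]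
          by_cases hxy : x < y
          · simp only [hxy, if_true]
            rw [ih as' bs' (by simp at hn ⊢; omega) hmin']
          · simp only [hxy, if_false]
            rw [← h2, ih as' (bs' ++ [y]) (by simp at hn ⊢; omega) hmin']

-- forward greedy = reverse greedy on sorted lists
theorem opt_eq_Gg (as : List Int) : ∀ bs : List Int,
    as.Pairwise (· ≤ ·) → bs.Pairwise (· ≤ ·) → opt as bs = Gg as bs := by
  induction as with
  | nil => intro bs _ _; simp [opt, Gg_nil_left]
  | cons a as iha =>
      intro bs hsa hsb
      induction bs with
      | nil => simp [opt_nil_right, Gg_nil_right]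
      | cons b bs ihb =>
          by_cases hab : a < b
          · have hsa' : as.Pairwise (· ≤ ·) := (List.pairwise_cons.mp hsa).2
            have hsb' : bs.Pairwise (· ≤ ·) := (List.pairwise_cons.mp hsb).2
            rw [Gg_key (as.length + bs.length) as bs a b le_rfl hsa hsb hab]
            simp only [opt, hab, if_true]
            rw [iha bs hsa' hsb']
          · have hba : b ≤ a := le_of_not_gt hab
            have hsb' : bs.Pairwise (· ≤ ·) := (List.pairwise_cons.mp hsb).2
            have hmin : ∀ x ∈ (a :: as), b ≤ x := by
              intro x hx
              rcases List.mem_cons.mp hx with h | h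
              · omega
              · exact le_trans hba ((List.pairwise_cons.mp hsa).1 x h)
            rw [Gg_dropmin ((a :: as).length + bs.length) (a :: as) bs b le_rfl hmin]
            simp only [opt, hab, if_false]
            exact ihb hsb'

theorem sorted_pairwise_le (xs : List Int) :
    (PySem.List.sorted xs (fun x => x) false).Pairwise (· ≤ ·) := by
  have := PySem.List.sorted_pairwise xs (fun x : Int => x)
  simpa using this

theorem solution_eq_opt (A B : List Int) :
    solution A B = opt (PySem.List.sorted A (fun x => x) false)
                       (PySem.List.sorted B (fun x => x) false) := by
  simp only [solution]
  rw [foldA _ _ 0 0 (by omega)]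
  simp

theorem solution_alt_eq_Gg (A B : List Int) :
    solution_alt A B = Gg (PySem.List.sorted A (fun x => x) false)
                          (PySem.List.sorted B (fun x => x) false) := by
  simp only [solution_alt, PySem.List.slice?_none_none_neg_one, Option.getD_some]
  have h0 : (0 : Int) = ((0 : Nat) : Int) := rfl
  rw [h0, foldB]
  simp [Gg]

-- ===== VERDICT (by name: the statement is the Claim_ definition above) =====
theorem solution_spec : Claim_equal_solution := by
  intro A B _
  unfold Spec_solution
  rw [solution_eq_opt, solution_alt_eq_Gg]
  exact opt_eq_Gg _ _ (sorted_pairwise_le A) (sorted_pairwise_le B)
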